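-- pv_equiv track=rewrite | github.com/jps531/ms-hs-football-playoff-engine | prefect/region_scenarios_pipeline.py | consolidate_opposites
-- ===== SOURCE A (Python) =====
-- from typing import Dict, List, Tuple, Optional
--
-- def consolidate_opposites(dicts: List[Dict[str, bool]]) -> List[Dict[str, bool]]:
--     out, used = [], set()
--     for i, d1 in enumerate(dicts):
--         if i in used:
--             continue
--         merged = False
--         for j in range(i + 1, len(dicts)):
--             if j in used:
--                 continue
--             d2 = dicts[j]
--             if set(d1.keys()) != set(d2.keys()):
--                 continue
--             dif = [k for k in d1 if d1[k] != d2[k]]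
--             if len(dif) == 1:
--                 kdiff = dif[0]
--                 nd = {k: v for k, v in d1.items() if k != kdiff}
--                 out.append(nd)
--                 used.update({i, j})
--                 merged = True
--                 break
--         if not merged:
--             out.append(d1)
--     return out
-- ===== SOURCE B (Python) =====
-- from typing import Dict, List
--
-- def consolidate_opposites(dicts: List[Dict[str, bool]]) -> List[Dict[str, bool]]:
--     # Encode every dict as (frozenset of keys, bitmask of its values over the
--     # sorted key list) and bucket each dict once per key under
--     # (key, keyset, full bitmask).  An opposite partner of d1 at sorted-key
--     # position p is exactly a dict with the same keyset whose mask is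
--     # mask1 ^ (1 << p), so A's quadratic rescan becomes per-key bucket lookups.
--     buckets = {}
--     for idx, d in enumerate(dicts):
--         keys_sorted = sorted(d)
--         kfs = frozenset(keys_sorted)
--         mask = 0
--         for p in range(len(keys_sorted)):
--             if d[keys_sorted[p]]:
--                 mask |= 1 << p
--         for k in d:
--             buckets.setdefault((k, kfs, mask), []).append(idx)
--     out, used = [], set()
--     for i, d1 in enumerate(dicts):
--         if i in used:
--             continue
--         keys_sorted = sorted(d1)
--         kfs = frozenset(keys_sorted)
--         mask = 0
--         for p in range(len(keys_sorted)):
--             if d1[keys_sorted[p]]: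
--                 mask |= 1 << p
--         best = None
--         for p in range(len(keys_sorted)):
--             for j in buckets.get((keys_sorted[p], kfs, mask ^ (1 << p)), ()):
--                 if j > i and j not in used:
--                     if best is None or j < best[0]:
--                         best = (j, keys_sorted[p])
--                     break  # bucket lists are ascending
--         if best is None:
--             out.append(d1)
--         else:
--             used.add(best[0])
--             out.append({k: v for k, v in d1.items() if k != best[1]})
--     return out
-- ===== Notes on version B (the rewrite author's own statement) =====
-- stated objective: faster
-- what changed: A rescans all later dicts for each dict (set comparison plus key-by-key diff per pair); B encodes each dict as (frozenset of keys, bitmask of its boolean values over the sorted keys), buckets it once per key under (key, keyset, mask), and finds the opposite partner at sorted-key position p by looking up mask XOR (1 << p), so the quadratic inner rescan becomes per-key hash lookups.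
import Mathlib
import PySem

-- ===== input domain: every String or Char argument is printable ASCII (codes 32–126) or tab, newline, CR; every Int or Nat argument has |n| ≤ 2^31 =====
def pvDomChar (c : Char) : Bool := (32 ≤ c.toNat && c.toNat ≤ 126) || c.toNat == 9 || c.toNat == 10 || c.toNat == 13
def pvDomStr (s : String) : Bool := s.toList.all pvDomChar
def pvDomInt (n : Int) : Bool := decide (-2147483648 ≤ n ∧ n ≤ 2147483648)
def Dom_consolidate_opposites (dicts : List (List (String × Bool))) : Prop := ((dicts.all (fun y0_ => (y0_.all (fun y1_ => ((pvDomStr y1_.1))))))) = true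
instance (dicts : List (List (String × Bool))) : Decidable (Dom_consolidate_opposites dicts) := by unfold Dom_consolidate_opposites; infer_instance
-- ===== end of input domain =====

-- B replaces A's quadratic rescan for an opposite partner by hashing: every dict is
-- encoded as (keyset, bitmask of its values over the sorted keys) and bucketed once per
-- key; the partner differing exactly at sorted-key position p is found by looking up
-- mask XOR (1 << p); objective: faster.

-- ===== PORT A =====
-- dict lookup d[k] (always called with k a key of d here)
def pvLk (d : List (String × Bool)) (k : String) : Bool :=
  ((d.find? (fun q => q.1 == k)).map (·.2)).getD false

-- set(d1.keys()) == set(d2.keys())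
def pvKeysEqA (d1 d2 : List (String × Bool)) : Bool :=
  PySem.Set.equal (PySem.Set.ofList (d1.map Prod.fst)) (PySem.Set.ofList (d2.map Prod.fst))

-- [k for k in d1 if d1[k] != d2[k]]
def pvDif (d1 d2 : List (String × Bool)) : List String :=
  (d1.map Prod.fst).filter (fun k => pvLk d1 k != pvLk d2 k)

-- inner 'for j in range(i+1, len(dicts))' with break
def pvScanA (dicts : List (List (String × Bool))) (d1 : List (String × Bool))
    (used : PySem.Set Nat) : List Nat → Option (Nat × List (String × Bool))
  | [] => none
  | j :: js =>
    if used.contains j then pvScanA dicts d1 used js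
    else
      let d2 := dicts.getD j []
      if !(pvKeysEqA d1 d2) then pvScanA dicts d1 used js
      else
        let dif := pvDif d1 d2
        if dif.length == 1 then
          some (j, d1.filter (fun q => q.1 != dif.headD ""))
        else pvScanA dicts d1 used js

-- outer 'for i, d1 in enumerate(dicts)'
def pvLoopA (dicts : List (List (String × Bool))) :
    List Nat → List (List (String × Bool)) × PySem.Set Nat → List (List (String × Bool))
  | [], st => st.1
  | i :: is, (out, used) =>
    if used.contains i then pvLoopA dicts is (out, used)
    else
      let d1 := dicts.getD i []
      match pvScanA dicts d1 used ((List.range dicts.length).drop (i + 1)) with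
      | some (j, nd) => pvLoopA dicts is (out ++ [nd], PySem.Set.add (PySem.Set.add used i) j)
      | none => pvLoopA dicts is (out ++ [d1], used)

def consolidate_opposites (dicts : List (List (String × Bool))) : List (List (String × Bool)) :=
  pvLoopA dicts (List.range dicts.length) ([], PySem.Set.empty)

-- ===== PORT B =====
-- Python's bucket dict is keyed by tuples (str, frozenset, int); key equality is exact
-- equality on the str and int and SET equality on the frozenset, so the dict is ported
-- by hand as an association list under pvSigEq (exact: hash lookup = first key equal under ==).
def pvSigEq (s t : String × List String × Nat) : Bool :=
  s.1 == t.1 && PySem.Set.equal s.2.1 t.2.1 && s.2.2 == t.2.2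

-- sorted(d) (the sorted list of keys)
def pvSortedKeys (d : List (String × Bool)) : List String :=
  PySem.List.sorted (d.map Prod.fst) (fun x => x) false

-- frozenset(keys_sorted)
def pvKeySet (d : List (String × Bool)) : PySem.Set String :=
  PySem.Set.ofList (pvSortedKeys d)

-- mask = 0; for p in range(len(keys_sorted)): if d[keys_sorted[p]]: mask |= 1 << p
def pvMaskOf (d : List (String × Bool)) : Nat :=
  (List.range (pvSortedKeys d).length).foldl
    (fun m p => if pvLk d ((pvSortedKeys d).getD p "") then m ||| (1 <<< p) else m) 0

-- buckets.get(s, ())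
def pvBGet (B : List ((String × List String × Nat) × List Nat))
    (s : String × List String × Nat) : List Nat :=
  ((B.find? (fun e => pvSigEq e.1 s)).map (·.2)).getD []

-- buckets.setdefault(s, []).append(j)
def pvBAdd (B : List ((String × List String × Nat) × List Nat))
    (s : String × List String × Nat) (j : Nat) :
    List ((String × List String × Nat) × List Nat) :=
  if B.any (fun e => pvSigEq e.1 s) then
    B.map (fun e => if pvSigEq e.1 s then (e.1, e.2 ++ [j]) else e)
  else B ++ [(s, [j])]

-- the building loops: one signature (k, keyset, full mask) per key of each dict
def pvBuild (dicts : List (List (String × Bool))) :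
    List ((String × List String × Nat) × List Nat) :=
  (List.range dicts.length).foldl
    (fun B idx =>
      (dicts.getD idx []).foldl
        (fun B q => pvBAdd B (q.1, pvKeySet (dicts.getD idx []), pvMaskOf (dicts.getD idx [])) idx) B)
    []

-- 'for j in bucket: if j > i and j not in used: …; break'
def pvFirstGood (i : Nat) (used : PySem.Set Nat) : List Nat → Option Nat
  | [] => none
  | j :: js => if i < j && !(used.contains j) then some j else pvFirstGood i used js

-- the 'best' accumulator over the sorted-key positions of d1
def pvBest (B : List ((String × List String × Nat) × List Nat))
    (d1 : List (String × Bool)) (i : Nat) (used : PySem.Set Nat) : Option (Nat × String) :=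
  (List.range (pvSortedKeys d1).length).foldl
    (fun best p =>
      match pvFirstGood i used
          (pvBGet B ((pvSortedKeys d1).getD p "", pvKeySet d1, pvMaskOf d1 ^^^ (1 <<< p))) with
      | none => best
      | some j =>
        match best with
        | none => some (j, (pvSortedKeys d1).getD p "")
        | some b => if j < b.1 then some (j, (pvSortedKeys d1).getD p "") else best)
    none

-- outer 'for i, d1 in enumerate(dicts)'
def pvLoopB (dicts : List (List (String × Bool)))
    (B : List ((String × List String × Nat) × List Nat)) :
    List Nat → List (List (String × Bool)) × PySem.Set Nat → List (List (String × Bool))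
  | [], st => st.1
  | i :: is, (out, used) =>
    if used.contains i then pvLoopB dicts B is (out, used)
    else
      let d1 := dicts.getD i []
      match pvBest B d1 i used with
      | none => pvLoopB dicts B is (out ++ [d1], used)
      | some (j, k) =>
        pvLoopB dicts B is (out ++ [d1.filter (fun q => q.1 != k)], PySem.Set.add used j)

def consolidate_opposites_alt (dicts : List (List (String × Bool))) : List (List (String × Bool)) :=
  pvLoopB dicts (pvBuild dicts) (List.range dicts.length) ([], PySem.Set.empty)

-- ===== PRECONDITION & SPEC =====
-- Python's argument is List[Dict[str, bool]]: a dict cannot carry a duplicate key, so Pre_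
-- admits exactly the association lists that represent Python dicts (distinct keys per list).
def Pre_consolidate_opposites (dicts : List (List (String × Bool))) : Prop :=
  ∀ d ∈ dicts, (d.map Prod.fst).Nodup
instance (dicts : List (List (String × Bool))) : Decidable (Pre_consolidate_opposites dicts) := by
  unfold Pre_consolidate_opposites; infer_instance

def pvWitness_consolidate_opposites : (List (List (String × Bool))) :=
  [[("a", true), ("b", true)], [("a", false), ("b", true)], [("a", true)]]

def Spec_consolidate_opposites (dicts : List (List (String × Bool))) (out : List (List (String × Bool))) : Prop := out = consolidate_opposites_alt dicts
instance (dicts : List (List (String × Bool))) (out : List (List (String × Bool))) : Decidable (Spec_consolidate_opposites dicts out) := by unfold Spec_consolidate_opposites; infer_instance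

-- ===== CLAIM (what is proved, stated in full; the proofs are below) =====
def Claim_equal_consolidate_opposites : Prop := ∀ (dicts : List (List (String × Bool))), Dom_consolidate_opposites dicts → Pre_consolidate_opposites dicts → Spec_consolidate_opposites dicts (consolidate_opposites dicts)

-- ===== LEMMAS AND PROOFS =====

-- ---- basic dict (association list with distinct keys) facts ----
theorem pvLk_of_mem {d : List (String × Bool)} {p : String × Bool}
    (hd : (d.map Prod.fst).Nodup) (hp : p ∈ d) : pvLk d p.1 = p.2 := by
  induction d with
  | nil => cases hp
  | cons e rest ih =>
    simp only [List.map_cons, List.nodup_cons] at hd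
    rcases List.mem_cons.mp hp with h | h
    · subst h; simp [pvLk]
    · have hne : p.1 ≠ e.1 := by
        intro hEq; exact hd.1 (hEq ▸ List.mem_map_of_mem h)
      have : (e.1 == p.1) = false := by
        simp [beq_eq_false_iff_ne]; exact fun hc => hne hc.symm
      simp only [pvLk, List.find?_cons, this]
      exact ih hd.2 h

theorem pvMem_of_key {d : List (String × Bool)} {k : String}
    (hk : k ∈ d.map Prod.fst) : (k, pvLk d k) ∈ d := by
  induction d with
  | nil => cases hk
  | cons e rest ih =>
    by_cases h : e.1 = k
    · have hLk : pvLk (e :: rest) k = e.2 := by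
        simp [pvLk, h]
      rw [hLk]
      have : (k, e.2) = e := by rw [← h]
      rw [this]; exact List.mem_cons_self

    · have : (e.1 == k) = false := by simp [h]
      simp only [pvLk, List.find?_cons, this]
      right
      apply ih
      rcases List.mem_map.mp hk with ⟨q, hq, hq1⟩
      rcases List.mem_cons.mp hq with rfl | hq'
      · exact absurd hq1 h
      · exact hq1 ▸ List.mem_map_of_mem hq'

theorem pvMem_iff {d : List (String × Bool)} {p : String × Bool}
    (hd : (d.map Prod.fst).Nodup) :
    p ∈ d ↔ p.1 ∈ d.map Prod.fst ∧ p.2 = pvLk d p.1 := by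
  constructor
  · intro hp; exact ⟨List.mem_map_of_mem hp, (pvLk_of_mem hd hp).symm⟩
  · rintro ⟨h1, h2⟩
    have hp : p = (p.1, pvLk d p.1) := by rw [Prod.ext_iff]; exact ⟨rfl, h2⟩
    rw [hp]; exact pvMem_of_key h1

-- ---- Match characterisation ----
def MatchAt (d1 d2 : List (String × Bool)) (k : String) : Prop :=
  k ∈ d1.map Prod.fst ∧ k ∈ d2.map Prod.fst ∧ pvLk d2 k = !(pvLk d1 k) ∧
  ∀ q : String × Bool, q.1 ≠ k → (q ∈ d1 ↔ q ∈ d2)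

theorem pvKeysEqA_iff {d1 d2 : List (String × Bool)} :
    pvKeysEqA d1 d2 = true ↔ ∀ x, x ∈ d1.map Prod.fst ↔ x ∈ d2.map Prod.fst := by
  rw [pvKeysEqA, PySem.Set.equal_iff]
  constructor
  · intro h x
    have := h x
    simpa [PySem.Set.mem_ofList] using this
  · intro h x
    simpa [PySem.Set.mem_ofList] using h x

theorem filter_eq_singleton {l : List String} {p : String → Bool} {k : String}
    (hl : l.Nodup) (hk : k ∈ l) (h : ∀ x ∈ l, p x = true ↔ x = k) :
    l.filter p = [k] := by
  induction l with
  | nil => cases hk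
  | cons e rest ih =>
    rcases List.mem_cons.mp hk with heq | hk'
    · subst heq
      have hpk : p k = true := (h k List.mem_cons_self).mpr rfl
      have hrest : rest.filter p = [] := by
        rw [List.filter_eq_nil_iff]
        intro x hx hpx
        have hxk : x = k := (h x (List.mem_cons_of_mem _ hx)).mp hpx
        exact (List.nodup_cons.mp hl).1 (hxk ▸ hx)
      rw [List.filter_cons_of_pos hpk, hrest]
    · have hne : e ≠ k := by
        intro hEq; exact (List.nodup_cons.mp hl).1 (hEq ▸ hk')
      have hpe : p e = false := by
        by_contra hb
        have hpt : p e = true := by revert hb; cases p e <;> simp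
        exact hne ((h e List.mem_cons_self).mp hpt)
      rw [List.filter_cons_of_neg (by simp [hpe])]
      exact ih (List.nodup_cons.mp hl).2 hk' (fun x hx => h x (List.mem_cons_of_mem _ hx))

theorem matchAt_iff {d1 d2 : List (String × Bool)} {k : String}
    (hd1 : (d1.map Prod.fst).Nodup) (hd2 : (d2.map Prod.fst).Nodup) :
    (pvKeysEqA d1 d2 = true ∧ pvDif d1 d2 = [k]) ↔ MatchAt d1 d2 k := by
  constructor
  · rintro ⟨hK, hDif⟩
    rw [pvKeysEqA_iff] at hK
    have hkmem1 : k ∈ d1.map Prod.fst := by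
      have : k ∈ pvDif d1 d2 := by rw [hDif]; exact List.mem_cons_self
      exact List.mem_of_mem_filter this
    have hkdif : (pvLk d1 k != pvLk d2 k) = true := by
      have hmf : k ∈ pvDif d1 d2 := by rw [hDif]; exact List.mem_cons_self
      rw [pvDif] at hmf
      exact (List.mem_filter.mp hmf).2
    have hkval : pvLk d2 k = !(pvLk d1 k) := by
      revert hkdif; cases pvLk d1 k <;> cases pvLk d2 k <;> simp
    have hoff : ∀ x, x ∈ d1.map Prod.fst → x ≠ k → pvLk d1 x = pvLk d2 x := by
      intro x hx hne
      by_contra hne2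
      have hmemf : x ∈ pvDif d1 d2 :=
        List.mem_filter.mpr ⟨hx, by simpa [bne_iff_ne] using hne2⟩
      rw [hDif] at hmemf
      exact hne (by simpa using hmemf)
    refine ⟨hkmem1, (hK k).mp hkmem1, hkval, ?_⟩
    intro q hq
    constructor
    · intro hq1
      have h1 : q.1 ∈ d1.map Prod.fst := List.mem_map_of_mem hq1
      have h2 : q.2 = pvLk d1 q.1 := (pvLk_of_mem hd1 hq1).symm
      rw [pvMem_iff hd2]
      exact ⟨(hK q.1).mp h1, by rw [h2]; exact hoff q.1 h1 hq⟩
    · intro hq2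
      have h1 : q.1 ∈ d2.map Prod.fst := List.mem_map_of_mem hq2
      have h2 : q.2 = pvLk d2 q.1 := (pvLk_of_mem hd2 hq2).symm
      have h1' : q.1 ∈ d1.map Prod.fst := (hK q.1).mpr h1
      rw [pvMem_iff hd1]
      exact ⟨h1', by rw [h2]; exact (hoff q.1 h1' hq).symm⟩
  · rintro ⟨hk1, hk2, hval, hoff⟩
    have hoffLk : ∀ x, x ∈ d1.map Prod.fst → x ≠ k → pvLk d1 x = pvLk d2 x := by
      intro x hx hne
      have hmem : (x, pvLk d1 x) ∈ d1 := pvMem_of_key hx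
      have hmem2 : (x, pvLk d1 x) ∈ d2 := (hoff (x, pvLk d1 x) hne).mp hmem
      exact (pvLk_of_mem hd2 hmem2).symm
    have hK : pvKeysEqA d1 d2 = true := by
      rw [pvKeysEqA_iff]
      intro x
      by_cases hxk : x = k
      · subst hxk; exact ⟨fun _ => hk2, fun _ => hk1⟩
      · constructor
        · intro hx
          exact List.mem_map_of_mem ((hoff (x, pvLk d1 x) hxk).mp (pvMem_of_key hx))
        · intro hx
          exact List.mem_map_of_mem ((hoff (x, pvLk d2 x) hxk).mpr (pvMem_of_key hx))
    refine ⟨hK, ?_⟩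
    rw [pvDif]
    apply filter_eq_singleton hd1 hk1
    intro x hx
    constructor
    · intro hpx
      by_contra hne
      have := hoffLk x hx hne
      rw [this] at hpx
      simp at hpx
    · intro hEq
      subst hEq
      rw [hval]
      cases pvLk d1 x <;> simp

theorem matchAt_unique {d1 d2 : List (String × Bool)} {k k' : String}
    (hd2 : (d2.map Prod.fst).Nodup)
    (h : MatchAt d1 d2 k) (h' : MatchAt d1 d2 k') : k = k' := by
  by_contra hne
  obtain ⟨hk1, hk2, hval, hoff⟩ := h
  obtain ⟨_, _, _, hoff'⟩ := h'
  have hmem : (k, pvLk d1 k) ∈ d1 := pvMem_of_key hk1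
  have hmem2 : (k, pvLk d1 k) ∈ d2 := (hoff' (k, pvLk d1 k) hne).mp hmem
  have := pvLk_of_mem hd2 hmem2
  rw [hval] at this
  cases pvLk d1 k <;> simp_all

theorem matchB_iff {d1 d2 : List (String × Bool)}
    (hd1 : (d1.map Prod.fst).Nodup) (hd2 : (d2.map Prod.fst).Nodup) :
    (pvKeysEqA d1 d2 = true ∧ (pvDif d1 d2).length = 1) ↔ ∃ k, MatchAt d1 d2 k := by
  constructor
  · rintro ⟨hK, hlen⟩
    match hd : pvDif d1 d2, hlen with
    | [k], _ => exact ⟨k, (matchAt_iff hd1 hd2).mp ⟨hK, hd⟩⟩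
  · rintro ⟨k, hM⟩
    obtain ⟨hK, hDif⟩ := (matchAt_iff hd1 hd2).mpr hM
    exact ⟨hK, by rw [hDif]; rfl⟩

-- ---- bucket dictionary (hand-rolled: keys compared by pvSigEq) ----
theorem sigEq_iff {s t : String × List String × Nat} :
    pvSigEq s t = true ↔ s.1 = t.1 ∧ (∀ x, x ∈ s.2.1 ↔ x ∈ t.2.1) ∧ s.2.2 = t.2.2 := by
  rw [pvSigEq]
  constructor
  · intro h
    simp only [Bool.and_eq_true, beq_iff_eq] at h
    exact ⟨h.1.1, (PySem.Set.equal_iff _ _).mp h.1.2, h.2⟩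
  · rintro ⟨h1, h2, h3⟩
    simp only [Bool.and_eq_true, beq_iff_eq]
    exact ⟨⟨h1, (PySem.Set.equal_iff _ _).mpr h2⟩, h3⟩

theorem sigEq_symm {s t : String × List String × Nat}
    (h : pvSigEq s t = true) : pvSigEq t s = true := by
  rw [sigEq_iff] at h ⊢
  exact ⟨h.1.symm, fun x => (h.2.1 x).symm, h.2.2.symm⟩

theorem sigEq_trans {s t u : String × List String × Nat}
    (h1 : pvSigEq s t = true) (h2 : pvSigEq t u = true) : pvSigEq s u = true := by
  rw [sigEq_iff] at h1 h2 ⊢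
  exact ⟨h1.1.trans h2.1, fun x => (h1.2.1 x).trans (h2.2.1 x), h1.2.2.trans h2.2.2⟩

def pvPW (B : List ((String × List String × Nat) × List Nat)) : Prop :=
  B.Pairwise (fun e f => pvSigEq e.1 f.1 = false)

theorem badd_cons_of_ne {B : List ((String × List String × Nat) × List Nat)}
    {e : (String × List String × Nat) × List Nat}
    {s : String × List String × Nat} {j : Nat}
    (he : pvSigEq e.1 s = false) :
    pvBAdd (e :: B) s j = e :: pvBAdd B s j := by
  rw [pvBAdd, pvBAdd, List.any_cons, he]
  by_cases hB : B.any (fun f => pvSigEq f.1 s) = true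
  · simp [hB, he]
  · simp only [Bool.false_or, hB]
    simp at hB
    simp

theorem map_keep_of_all_false {B : List ((String × List String × Nat) × List Nat)}
    {s : String × List String × Nat} {j : Nat}
    (h : ∀ f ∈ B, pvSigEq f.1 s = false) :
    B.map (fun f => if pvSigEq f.1 s then (f.1, f.2 ++ [j]) else f) = B := by
  induction B with
  | nil => rfl
  | cons e rest ih =>
    have he := h e List.mem_cons_self
    rw [List.map_cons, if_neg (by simp [he]), ih (fun f hf => h f (List.mem_cons_of_mem _ hf))]

theorem bget_badd {B : List ((String × List String × Nat) × List Nat)}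
    {s t : String × List String × Nat} {j : Nat}
    (hPW : pvPW B) :
    pvBGet (pvBAdd B s j) t =
      if pvSigEq s t = true then pvBGet B t ++ [j] else pvBGet B t := by
  induction B with
  | nil =>
    cases hst : pvSigEq s t <;> simp [pvBAdd, pvBGet, hst]
  | cons e rest ih =>
    have hPWr : pvPW rest := (List.pairwise_cons.mp hPW).2
    by_cases hes : pvSigEq e.1 s = true
    · have hrest : ∀ f ∈ rest, pvSigEq f.1 s = false := by
        intro f hf
        have hef := (List.pairwise_cons.mp hPW).1 f hf
        by_contra hb
        have hfs : pvSigEq f.1 s = true := by revert hb; cases pvSigEq f.1 s <;> simp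
        have : pvSigEq e.1 f.1 = true := sigEq_trans hes (sigEq_symm hfs)
        rw [hef] at this; cases this
      have hadd : pvBAdd (e :: rest) s j = (e.1, e.2 ++ [j]) :: rest := by
        rw [pvBAdd, if_pos (by simp [hes])]
        rw [List.map_cons, if_pos (by simp [hes]), map_keep_of_all_false hrest]
      rw [hadd]
      by_cases hst : pvSigEq s t = true
      · have het : pvSigEq e.1 t = true := sigEq_trans hes hst
        rw [if_pos hst]
        simp [pvBGet, het]
      · have het : pvSigEq e.1 t = false := by
          by_contra hb
          have het' : pvSigEq e.1 t = true := by revert hb; cases pvSigEq e.1 t <;> simp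
          exact hst (sigEq_trans (sigEq_symm hes) het')
        rw [if_neg hst]
        simp [pvBGet, het]
    · have hes' : pvSigEq e.1 s = false := by revert hes; cases pvSigEq e.1 s <;> simp
      rw [badd_cons_of_ne hes']
      by_cases het : pvSigEq e.1 t = true
      · have hst : pvSigEq s t = false := by
          by_contra hb
          have hst' : pvSigEq s t = true := by revert hb; cases pvSigEq s t <;> simp
          have : pvSigEq e.1 s = true := sigEq_trans het (sigEq_symm hst')
          rw [hes'] at this; cases this
        rw [hst]
        simp [pvBGet, het]
      · have het' : pvSigEq e.1 t = false := by revert het; cases pvSigEq e.1 t <;> simp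
        have hrec := ih hPWr
        by_cases hst : pvSigEq s t = true <;>
          simp_all [pvBGet]

theorem badd_PW {B : List ((String × List String × Nat) × List Nat)}
    {s : String × List String × Nat} {j : Nat}
    (hPW : pvPW B) : pvPW (pvBAdd B s j) := by
  rw [pvBAdd]
  by_cases hB : B.any (fun f => pvSigEq f.1 s) = true
  · rw [if_pos hB]
    rw [pvPW, List.pairwise_map]
    apply hPW.imp
    intro a b hab
    have ha : (if pvSigEq a.1 s then (a.1, a.2 ++ [j]) else a).1 = a.1 := by
      by_cases h : pvSigEq a.1 s = true <;> simp [h]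
    have hb : (if pvSigEq b.1 s then (b.1, b.2 ++ [j]) else b).1 = b.1 := by
      by_cases h : pvSigEq b.1 s = true <;> simp [h]
    rw [ha, hb]; exact hab
  · rw [if_neg hB]
    have hall : ∀ f ∈ B, pvSigEq f.1 s = false := by
      simpa using hB
    rw [pvPW, List.pairwise_append]
    exact ⟨hPW, List.pairwise_singleton _ _, fun e he f hf => by
      rcases List.mem_singleton.mp hf with rfl
      exact hall e he⟩

-- signature stored for item q of dict d by the building loops
def pvSigOf (d : List (String × Bool)) (q : String × Bool) : String × List String × Nat :=
  (q.1, pvKeySet d, pvMaskOf d)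

theorem inner_PW {d : List (String × Bool)} {idx : Nat}
    (l : List (String × Bool))
    {B : List ((String × List String × Nat) × List Nat)} (hPW : pvPW B) :
    pvPW (l.foldl (fun B q => pvBAdd B (pvSigOf d q) idx) B) := by
  induction l generalizing B with
  | nil => exact hPW
  | cons q rest ih => exact ih (badd_PW hPW)

theorem bget_inner {d : List (String × Bool)} {idx : Nat}
    {t : String × List String × Nat} :
    ∀ (l : List (String × Bool))
      (B : List ((String × List String × Nat) × List Nat)),
      pvPW B → (l.map Prod.fst).Nodup →
      pvBGet (l.foldl (fun B q => pvBAdd B (pvSigOf d q) idx) B) t =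
        pvBGet B t ++ (if l.any (fun q => pvSigEq (pvSigOf d q) t) then [idx] else []) := by
  intro l
  induction l with
  | nil => intro B _ _; simp
  | cons q rest ih =>
    intro B hPW hnd
    rw [List.foldl_cons, ih _ (badd_PW hPW) (by simpa using (List.nodup_cons.mp (by simpa using hnd)).2),
        bget_badd hPW]
    by_cases hq : pvSigEq (pvSigOf d q) t = true
    · have hrest : rest.any (fun q' => pvSigEq (pvSigOf d q') t) = false := by
        rw [List.any_eq_false]
        intro q' hq' hb
        have h1 : q.1 = t.1 := ((sigEq_iff).mp hq).1
        have h2 : q'.1 = t.1 := ((sigEq_iff).mp hb).1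
        have : q.1 ∉ rest.map Prod.fst := (List.nodup_cons.mp (by simpa using hnd)).1
        apply this
        have hm := List.mem_map_of_mem (f := Prod.fst) hq'
        rwa [h2, ← h1] at hm
      rw [if_pos hq, hrest]
      simp [List.any_cons, hq]
    · rw [if_neg hq]
      have : (q :: rest).any (fun q' => pvSigEq (pvSigOf d q') t)
           = rest.any (fun q' => pvSigEq (pvSigOf d q') t) := by
        simp only [List.any_cons]
        cases hq2 : pvSigEq (pvSigOf d q) t
        · simp
        · exact absurd hq2 hq
      rw [this]

theorem bget_build {dicts : List (List (String × Bool))}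
    (hPre : ∀ d ∈ dicts, (d.map Prod.fst).Nodup)
    (t : String × List String × Nat) :
    pvBGet (pvBuild dicts) t =
      (List.range dicts.length).filter
        (fun j => (dicts.getD j []).any (fun q => pvSigEq (pvSigOf (dicts.getD j []) q) t)) := by
  rw [pvBuild]
  have main : ∀ (l : List Nat) (B : List ((String × List String × Nat) × List Nat)),
      pvPW B → (∀ j ∈ l, ((dicts.getD j []).map Prod.fst).Nodup) →
      pvBGet (l.foldl (fun B idx => (dicts.getD idx []).foldl
          (fun B q => pvBAdd B (q.1, pvKeySet (dicts.getD idx []), pvMaskOf (dicts.getD idx [])) idx) B) B) t =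
        pvBGet B t ++ l.filter
          (fun j => (dicts.getD j []).any (fun q => pvSigEq (pvSigOf (dicts.getD j []) q) t)) := by
    intro l
    induction l with
    | nil => intro B _ _; simp
    | cons idx rest ih =>
      intro B hPW hnd
      rw [List.foldl_cons]
      have hstep : ((dicts.getD idx []).foldl
          (fun B q => pvBAdd B (q.1, pvKeySet (dicts.getD idx []), pvMaskOf (dicts.getD idx [])) idx) B)
          = ((dicts.getD idx []).foldl
          (fun B q => pvBAdd B (pvSigOf (dicts.getD idx []) q) idx) B) := rfl
      rw [hstep, ih _ (inner_PW _ hPW) (fun j hj => hnd j (List.mem_cons_of_mem _ hj)),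
          bget_inner _ _ hPW (hnd idx List.mem_cons_self)]
      rw [List.append_assoc, List.filter_cons]
      cases hany : ((dicts.getD idx []).any fun q => pvSigEq (pvSigOf (dicts.getD idx []) q) t) <;>
        simp
  have h0 : pvBGet ([] : List ((String × List String × Nat) × List Nat)) t = [] := rfl
  rw [main (List.range dicts.length) [] (List.Pairwise.nil)
        (fun j hj => hPre _ (by
          rw [List.getD_eq_getElem _ _ (List.mem_range.mp hj)]
          exact List.getElem_mem _)), h0, List.nil_append]


-- ---- sorted keys ----
theorem ks_perm (d : List (String × Bool)) : (pvSortedKeys d).Perm (d.map Prod.fst) :=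
  PySem.List.sorted_perm _ _ _

theorem mem_ks {d : List (String × Bool)} {k : String} :
    k ∈ pvSortedKeys d ↔ k ∈ d.map Prod.fst := (ks_perm d).mem_iff

theorem nodup_ks {d : List (String × Bool)} (hd : (d.map Prod.fst).Nodup) :
    (pvSortedKeys d).Nodup := ((ks_perm d).nodup_iff).mpr hd

theorem ks_eq {d1 d2 : List (String × Bool)}
    (hd1 : (d1.map Prod.fst).Nodup) (hd2 : (d2.map Prod.fst).Nodup)
    (h : ∀ x, x ∈ d1.map Prod.fst ↔ x ∈ d2.map Prod.fst) :
    pvSortedKeys d1 = pvSortedKeys d2 := by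
  rw [pvSortedKeys, pvSortedKeys]
  exact (PySem.List.sorted_id_eq_sorted_id_iff_perm _ _).mpr
    ((List.perm_ext_iff_of_nodup hd1 hd2).mpr h)

theorem keySet_equal_iff {d1 d2 : List (String × Bool)} :
    (∀ x, x ∈ pvKeySet d1 ↔ x ∈ pvKeySet d2) ↔
      (∀ x, x ∈ d1.map Prod.fst ↔ x ∈ d2.map Prod.fst) := by
  constructor <;> intro h x <;>
    have hx := h x <;>
    simp only [pvKeySet, PySem.Set.mem_ofList, mem_ks] at hx ⊢ <;> exact hx

-- ---- bitmask arithmetic ----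
theorem testBit_one' (i : Nat) : Nat.testBit 1 i = decide (i = 0) := by
  cases i with
  | zero => rfl
  | succ n =>
    have : (1 : Nat) = 2 ^ 0 := rfl
    rw [this, Nat.testBit_two_pow]
    simp

theorem testBit_shiftLeft_one {p r : Nat} : (1 <<< p).testBit r = decide (r = p) := by
  rw [Nat.testBit_shiftLeft, testBit_one']
  rcases lt_trichotomy p r with h | h | h
  · have h1 : (decide (r ≥ p)) = true := by simp; omega
    have h2 : (decide (r - p = 0)) = false := by simp; omega
    have h3 : (decide (r = p)) = false := by simp; omega
    rw [h1, h2, h3]; rfl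
  · subst h; simp
  · have h1 : (decide (r ≥ p)) = false := by simp; omega
    have h3 : (decide (r = p)) = false := by simp; omega
    rw [h1, h3]; rfl

theorem testBit_fold {c : Nat → Bool} :
    ∀ (l : List Nat) (m0 : Nat) (r : Nat),
      Nat.testBit (l.foldl (fun m p => if c p then m ||| (1 <<< p) else m) m0) r
        = (m0.testBit r || (l.contains r && c r)) := by
  intro l
  induction l with
  | nil => intro m0 r; simp
  | cons p rest ih =>
    intro m0 r
    rw [List.foldl_cons, ih]
    by_cases hc : c p = true
    · rw [if_pos hc, Nat.testBit_or, testBit_shiftLeft_one]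
      by_cases hpr : r = p
      · subst hpr
        simp [hc]
      · simp only [List.contains_cons]
        have : (r == p) = false := by simp [hpr]
        rw [this]
        simp [hpr]
    · have hc' : c p = false := by revert hc; cases c p <;> simp
      rw [if_neg (by rw [hc']; exact Bool.false_ne_true)]
      by_cases hpr : r = p
      · subst hpr
        simp [hc']
      · simp only [List.contains_cons]
        have : (r == p) = false := by simp [hpr]
        rw [this]
        simp

theorem testBit_maskOf {d : List (String × Bool)} {r : Nat} :
    (pvMaskOf d).testBit r =
      (decide (r < (pvSortedKeys d).length) && pvLk d ((pvSortedKeys d).getD r "")) := by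
  rw [pvMaskOf, testBit_fold]
  simp [List.mem_range]

theorem mask_xor_iff {d1 d2 : List (String × Bool)} {p : Nat}
    (hks : pvSortedKeys d2 = pvSortedKeys d1) (hp : p < (pvSortedKeys d1).length) :
    pvMaskOf d2 = pvMaskOf d1 ^^^ (1 <<< p) ↔
      (pvLk d2 ((pvSortedKeys d1).getD p "") = !(pvLk d1 ((pvSortedKeys d1).getD p "")) ∧
       ∀ r, r < (pvSortedKeys d1).length → r ≠ p →
         pvLk d2 ((pvSortedKeys d1).getD r "") = pvLk d1 ((pvSortedKeys d1).getD r "")) := by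
  constructor
  · intro h
    constructor
    · have := congrArg (fun m => Nat.testBit m p) h
      simp only [Nat.testBit_xor, testBit_shiftLeft_one] at this
      rw [testBit_maskOf, testBit_maskOf, hks] at this
      simp only [hp, decide_true, Bool.true_and] at this
      rw [this]
      cases pvLk d1 ((pvSortedKeys d1).getD p "") <;> rfl
    · intro r hr hrp
      have := congrArg (fun m => Nat.testBit m r) h
      simp only [Nat.testBit_xor, testBit_shiftLeft_one] at this
      rw [testBit_maskOf, testBit_maskOf, hks] at this
      simp only [hr, decide_true, Bool.true_and] at this
      have hrp' : decide (r = p) = false := by simp [hrp]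
      rw [hrp'] at this
      simpa using this
  · rintro ⟨hdiff, hsame⟩
    apply Nat.eq_of_testBit_eq
    intro r
    rw [Nat.testBit_xor, testBit_shiftLeft_one, testBit_maskOf, testBit_maskOf, hks]
    by_cases hr : r < (pvSortedKeys d1).length
    · by_cases hrp : r = p
      · subst hrp
        simp only [hr, decide_true, Bool.true_and, hdiff]
        cases pvLk d1 ((pvSortedKeys d1).getD r "") <;> simp
      · have hrp' : decide (r = p) = false := by simp [hrp]
        simp only [hr, decide_true, Bool.true_and, hrp', hsame r hr hrp]
        cases pvLk d1 ((pvSortedKeys d1).getD r "") <;> simp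
    · have hrp : r ≠ p := by omega
      have hrp' : decide (r = p) = false := by simp [hrp]
      simp [hr, hrp']

-- ---- bucket membership = opposite-partner match ----
theorem matchBit_iff {d1 d2 : List (String × Bool)} {p : Nat}
    (hd1 : (d1.map Prod.fst).Nodup) (hd2 : (d2.map Prod.fst).Nodup)
    (hp : p < (pvSortedKeys d1).length) :
    (d2.any (fun q => pvSigEq (pvSigOf d2 q)
        ((pvSortedKeys d1).getD p "", pvKeySet d1, pvMaskOf d1 ^^^ (1 <<< p))) = true) ↔
      MatchAt d1 d2 ((pvSortedKeys d1).getD p "") := by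
  have hkmem : (pvSortedKeys d1).getD p "" ∈ d1.map Prod.fst := by
    rw [← mem_ks, List.getD_eq_getElem _ _ hp]
    exact List.getElem_mem _
  rw [List.any_eq_true]
  constructor
  · rintro ⟨q, hq, hsig⟩
    obtain ⟨h1, h2, h3⟩ := sigEq_iff.mp hsig
    simp only [pvSigOf] at h1 h2 h3
    have hKiff : ∀ x, x ∈ d2.map Prod.fst ↔ x ∈ d1.map Prod.fst :=
      keySet_equal_iff.mp h2
    have hks : pvSortedKeys d2 = pvSortedKeys d1 := ks_eq hd2 hd1 hKiff
    obtain ⟨hdiff, hsame⟩ := (mask_xor_iff hks hp).mp h3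
    refine ⟨hkmem, (hKiff _).mpr hkmem, hdiff, ?_⟩
    intro x hx
    have hlkSame : ∀ k', k' ∈ d1.map Prod.fst → k' ≠ (pvSortedKeys d1).getD p "" →
        pvLk d2 k' = pvLk d1 k' := by
      intro k' hk' hne
      have hk'ks : k' ∈ pvSortedKeys d1 := mem_ks.mpr hk'
      obtain ⟨r, hr, hgr⟩ := List.mem_iff_getElem.mp hk'ks
      have hgr' : (pvSortedKeys d1).getD r "" = k' := by
        rw [List.getD_eq_getElem _ _ hr]; exact hgr
      have hrp : r ≠ p := by
        intro hEq; subst hEq; exact hne hgr'.symm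
      rw [← hgr']
      exact hsame r hr hrp
    constructor
    · intro hx1
      rw [pvMem_iff hd2]
      have h1' : x.1 ∈ d1.map Prod.fst := List.mem_map_of_mem hx1
      refine ⟨(hKiff _).mpr h1', ?_⟩
      rw [hlkSame x.1 h1' hx, ← pvLk_of_mem hd1 hx1]
    · intro hx2
      rw [pvMem_iff hd1]
      have h1' : x.1 ∈ d2.map Prod.fst := List.mem_map_of_mem hx2
      refine ⟨(hKiff _).mp h1', ?_⟩
      rw [← hlkSame x.1 ((hKiff _).mp h1') hx, ← pvLk_of_mem hd2 hx2]
  · intro hM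
    obtain ⟨hk1, hk2, hval, hoff⟩ := hM
    have hKiff : ∀ x, x ∈ d1.map Prod.fst ↔ x ∈ d2.map Prod.fst :=
      pvKeysEqA_iff.mp ((matchAt_iff hd1 hd2).mpr ⟨hk1, hk2, hval, hoff⟩).1
    have hks : pvSortedKeys d2 = pvSortedKeys d1 :=
      ks_eq hd2 hd1 (fun x => (hKiff x).symm)
    refine ⟨((pvSortedKeys d1).getD p "", pvLk d2 ((pvSortedKeys d1).getD p "")),
      pvMem_of_key hk2, ?_⟩
    rw [sigEq_iff]
    refine ⟨rfl, keySet_equal_iff.mpr (fun x => (hKiff x).symm), ?_⟩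
    simp only [pvSigOf]
    rw [mask_xor_iff hks hp]
    refine ⟨hval, ?_⟩
    intro r hr hrp
    have hkr : (pvSortedKeys d1).getD r "" ∈ d1.map Prod.fst := by
      rw [← mem_ks, List.getD_eq_getElem _ _ hr]
      exact List.getElem_mem _
    have hne : (pvSortedKeys d1).getD r "" ≠ (pvSortedKeys d1).getD p "" := by
      rw [List.getD_eq_getElem _ _ hr, List.getD_eq_getElem _ _ hp]
      intro hEq
      exact hrp ((List.Nodup.getElem_inj_iff (nodup_ks hd1)).mp hEq)
    have hmem1 : ((pvSortedKeys d1).getD r "", pvLk d1 ((pvSortedKeys d1).getD r "")) ∈ d1 :=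
      pvMem_of_key hkr
    have hmem2 := (hoff _ hne).mp hmem1
    exact pvLk_of_mem hd2 hmem2
-- ---- first eligible index in a bucket ----
theorem firstGood_none {i : Nat} {u : PySem.Set Nat} {l : List Nat} :
    pvFirstGood i u l = none ↔ ∀ j ∈ l, ¬(i < j ∧ u.contains j = false) := by
  induction l with
  | nil => simp [pvFirstGood]
  | cons j js ih =>
    rw [pvFirstGood]
    by_cases hj : i < j ∧ u.contains j = false
    · rw [if_pos (by rw [hj.2]; simp [hj.1])]
      simp only [List.mem_cons]
      constructor
      · intro h; cases h
      · intro h; exact absurd hj (h j (Or.inl rfl))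
    · rw [if_neg (by
        intro hb
        simp only [Bool.and_eq_true, decide_eq_true_eq, Bool.not_eq_true'] at hb
        exact hj ⟨hb.1, hb.2⟩)]
      rw [ih]
      constructor
      · intro h j' hj'
        rcases List.mem_cons.mp hj' with rfl | hm
        · exact hj
        · exact h j' hm
      · intro h j' hm; exact h j' (List.mem_cons_of_mem _ hm)

theorem firstGood_some {i : Nat} {u : PySem.Set Nat} {l : List Nat} {j : Nat}
    (hl : l.Pairwise (· < ·)) (h : pvFirstGood i u l = some j) :
    j ∈ l ∧ i < j ∧ u.contains j = false ∧
      ∀ j' ∈ l, i < j' → u.contains j' = false → j ≤ j' := by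
  induction l with
  | nil => cases h
  | cons a js ih =>
    rw [pvFirstGood] at h
    by_cases ha : i < a ∧ u.contains a = false
    · rw [if_pos (by rw [ha.2]; simp [ha.1])] at h
      cases h
      refine ⟨List.mem_cons_self, ha.1, ha.2, ?_⟩
      intro j' hj' _ _
      rcases List.mem_cons.mp hj' with rfl | hm
      · exact le_refl _
      · exact le_of_lt ((List.pairwise_cons.mp hl).1 j' hm)
    · rw [if_neg (by
        intro hb
        simp only [Bool.and_eq_true, decide_eq_true_eq, Bool.not_eq_true'] at hb
        exact ha ⟨hb.1, hb.2⟩)] at h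
      obtain ⟨hmem, hlt, hu, hmin⟩ := ih (List.pairwise_cons.mp hl).2 h
      refine ⟨List.mem_cons_of_mem _ hmem, hlt, hu, ?_⟩
      intro j' hj' hij' hu'
      rcases List.mem_cons.mp hj' with rfl | hm
      · exact absurd ⟨hij', hu'⟩ ha
      · exact hmin j' hm hij' hu'

-- ---- range/drop arithmetic ----
theorem drop_range_cons {n m : Nat} (h : m < n) :
    (List.range n).drop m = m :: (List.range n).drop (m + 1) := by
  rw [List.drop_eq_getElem_cons (by simpa using h)]; simp

theorem mem_drop_range : ∀ (fuel n m j : Nat), n - m ≤ fuel →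
    (j ∈ (List.range n).drop m ↔ m ≤ j ∧ j < n) := by
  intro fuel
  induction fuel with
  | zero =>
    intro n m j h
    have hnm : n ≤ m := by omega
    rw [List.drop_eq_nil_of_le (by simpa using hnm)]
    simp only [List.not_mem_nil, false_iff]
    omega
  | succ fuel ih =>
    intro n m j h
    by_cases hmn : m < n
    · rw [drop_range_cons hmn, List.mem_cons, ih n (m+1) j (by omega)]
      omega
    · rw [List.drop_eq_nil_of_le (by simp; omega)]
      simp only [List.not_mem_nil, false_iff]
      omega

theorem pairwise_drop_range {n m : Nat} : ((List.range n).drop m).Pairwise (· < ·) :=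
  (List.pairwise_lt_range).sublist (List.drop_sublist _ _)


-- ---- B's candidate relation ----
def pvP (dicts : List (List (String × Bool))) (d1 : List (String × Bool))
    (i : Nat) (u : PySem.Set Nat) (k : String) (j : Nat) : Prop :=
  i < j ∧ j < dicts.length ∧ u.contains j = false ∧ MatchAt d1 (dicts.getD j []) k

theorem nodup_getD {dicts : List (List (String × Bool))}
    (hPre : ∀ d ∈ dicts, (d.map Prod.fst).Nodup) {j : Nat} (hj : j < dicts.length) :
    ((dicts.getD j []).map Prod.fst).Nodup := by
  rw [List.getD_eq_getElem _ _ hj]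
  exact hPre _ (List.getElem_mem _)

theorem firstGood_bucket {dicts : List (List (String × Bool))} {d1 : List (String × Bool)}
    {i : Nat} {u : PySem.Set Nat} {p : Nat}
    (hPre : ∀ d ∈ dicts, (d.map Prod.fst).Nodup)
    (hd1 : (d1.map Prod.fst).Nodup) (hp : p < (pvSortedKeys d1).length) :
    (pvFirstGood i u (pvBGet (pvBuild dicts)
        ((pvSortedKeys d1).getD p "", pvKeySet d1, pvMaskOf d1 ^^^ (1 <<< p))) = none ↔
        ∀ j, ¬ pvP dicts d1 i u ((pvSortedKeys d1).getD p "") j) ∧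
    (∀ j, pvFirstGood i u (pvBGet (pvBuild dicts)
        ((pvSortedKeys d1).getD p "", pvKeySet d1, pvMaskOf d1 ^^^ (1 <<< p))) = some j →
        pvP dicts d1 i u ((pvSortedKeys d1).getD p "") j ∧
          ∀ j', pvP dicts d1 i u ((pvSortedKeys d1).getD p "") j' → j ≤ j') := by
  have hbl := bget_build hPre ((pvSortedKeys d1).getD p "", pvKeySet d1, pvMaskOf d1 ^^^ (1 <<< p))
  have hmem : ∀ j, j ∈ pvBGet (pvBuild dicts)
      ((pvSortedKeys d1).getD p "", pvKeySet d1, pvMaskOf d1 ^^^ (1 <<< p)) ↔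
      j < dicts.length ∧ MatchAt d1 (dicts.getD j []) ((pvSortedKeys d1).getD p "") := by
    intro j
    rw [hbl, List.mem_filter, List.mem_range]
    constructor
    · rintro ⟨hjn, hsig⟩
      exact ⟨hjn, (matchBit_iff hd1 (nodup_getD hPre hjn) hp).mp hsig⟩
    · rintro ⟨hjn, hM⟩
      exact ⟨hjn, (matchBit_iff hd1 (nodup_getD hPre hjn) hp).mpr hM⟩
  have hpw : (pvBGet (pvBuild dicts)
      ((pvSortedKeys d1).getD p "", pvKeySet d1, pvMaskOf d1 ^^^ (1 <<< p))).Pairwise (· < ·) := by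
    rw [hbl]
    exact (List.pairwise_lt_range).filter _
  constructor
  · rw [firstGood_none]
    constructor
    · intro h j hP
      obtain ⟨hij, hjn, hu, hM⟩ := hP
      exact h j ((hmem j).mpr ⟨hjn, hM⟩) ⟨hij, hu⟩
    · intro h j hj ⟨hij, hu⟩
      obtain ⟨hjn, hM⟩ := (hmem j).mp hj
      exact h j ⟨hij, hjn, hu, hM⟩
  · intro j hres
    obtain ⟨hmemj, hij, hu, hmin⟩ := firstGood_some hpw hres
    obtain ⟨hjn, hM⟩ := (hmem j).mp hmemj
    refine ⟨⟨hij, hjn, hu, hM⟩, ?_⟩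
    intro j' ⟨hij', hjn', hu', hM'⟩
    exact hmin j' ((hmem j').mpr ⟨hjn', hM'⟩) hij' hu'

-- ---- the 'best' fold of port B (over sorted-key positions) ----
def BInv (dicts : List (List (String × Bool))) (d1 : List (String × Bool))
    (i : Nat) (u : PySem.Set Nat) (acc : Option (Nat × String)) (Q : List Nat) : Prop :=
  (acc = none ∧ ∀ p ∈ Q, ∀ j, ¬ pvP dicts d1 i u ((pvSortedKeys d1).getD p "") j) ∨
  (∃ j p, acc = some (j, (pvSortedKeys d1).getD p "") ∧ p ∈ Q ∧
    pvP dicts d1 i u ((pvSortedKeys d1).getD p "") j ∧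
    ∀ p' ∈ Q, ∀ j', pvP dicts d1 i u ((pvSortedKeys d1).getD p' "") j' → j ≤ j')

theorem best_fold {dicts : List (List (String × Bool))} {d1 : List (String × Bool)}
    {i : Nat} {u : PySem.Set Nat}
    (hPre : ∀ d ∈ dicts, (d.map Prod.fst).Nodup) (hd1 : (d1.map Prod.fst).Nodup) :
    ∀ (l : List Nat) (acc : Option (Nat × String)) (Q : List Nat),
      (∀ p ∈ l, p < (pvSortedKeys d1).length) → BInv dicts d1 i u acc Q →
      BInv dicts d1 i u
        (l.foldl
          (fun best p =>
            match pvFirstGood i u (pvBGet (pvBuild dicts)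
                ((pvSortedKeys d1).getD p "", pvKeySet d1, pvMaskOf d1 ^^^ (1 <<< p))) with
            | none => best
            | some j =>
              match best with
              | none => some (j, (pvSortedKeys d1).getD p "")
              | some b => if j < b.1 then some (j, (pvSortedKeys d1).getD p "") else best)
          acc)
        (Q ++ l) := by
  intro l
  induction l with
  | nil => intro acc Q _ h; simpa using h
  | cons p rest ih =>
    intro acc Q hsub hInv
    rw [List.foldl_cons]
    have hp : p < (pvSortedKeys d1).length := hsub p List.mem_cons_self
    have hfb := firstGood_bucket (i := i) (u := u) hPre hd1 hp
    have hQ : Q ++ p :: rest = (Q ++ [p]) ++ rest := by simp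
    rw [hQ]
    apply ih _ _ (fun r hr => hsub r (List.mem_cons_of_mem _ hr))
    cases hres : pvFirstGood i u (pvBGet (pvBuild dicts)
        ((pvSortedKeys d1).getD p "", pvKeySet d1, pvMaskOf d1 ^^^ (1 <<< p))) with
    | none =>
      have hnoP : ∀ j, ¬ pvP dicts d1 i u ((pvSortedKeys d1).getD p "") j := (hfb.1).mp hres
      rcases hInv with ⟨hacc, hnone⟩ | ⟨j, pk, hacc, hkQ, hP, hmin⟩
      · left
        refine ⟨hacc, ?_⟩
        intro p' hp' j
        rcases List.mem_append.mp hp' with hp' | hp'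
        · exact hnone p' hp' j
        · rcases List.mem_singleton.mp hp' with rfl
          exact hnoP j
      · right
        refine ⟨j, pk, hacc, List.mem_append_left _ hkQ, hP, ?_⟩
        intro p' hp' j' hP'
        rcases List.mem_append.mp hp' with hp' | hp'
        · exact hmin p' hp' j' hP'
        · rcases List.mem_singleton.mp hp' with rfl
          exact absurd hP' (hnoP j')
    | some j0 =>
      obtain ⟨hP0, hmin0⟩ := (hfb.2) j0 hres
      rcases hInv with ⟨hacc, hnone⟩ | ⟨j, pk, hacc, hkQ, hP, hmin⟩
      · subst hacc
        right
        refine ⟨j0, p, rfl, List.mem_append_right _ (List.mem_singleton.mpr rfl), hP0, ?_⟩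
        intro p' hp' j' hP'
        rcases List.mem_append.mp hp' with hp' | hp'
        · exact absurd hP' (hnone p' hp' j')
        · rcases List.mem_singleton.mp hp' with rfl
          exact hmin0 j' hP'
      · subst hacc
        show BInv dicts d1 i u
          (if j0 < j then some (j0, (pvSortedKeys d1).getD p "")
           else some (j, (pvSortedKeys d1).getD pk "")) (Q ++ [p])
        by_cases hlt : j0 < j
        · rw [if_pos hlt]
          right
          refine ⟨j0, p, rfl, List.mem_append_right _ (List.mem_singleton.mpr rfl), hP0, ?_⟩
          intro p' hp' j' hP'
          rcases List.mem_append.mp hp' with hp' | hp'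
          · exact le_of_lt (lt_of_lt_of_le hlt (hmin p' hp' j' hP'))
          · rcases List.mem_singleton.mp hp' with rfl
            exact hmin0 j' hP'
        · rw [if_neg hlt]
          right
          refine ⟨j, pk, rfl, List.mem_append_left _ hkQ, hP, ?_⟩
          intro p' hp' j' hP'
          rcases List.mem_append.mp hp' with hp' | hp'
          · exact hmin p' hp' j' hP'
          · rcases List.mem_singleton.mp hp' with rfl
            exact le_trans (by omega) (hmin0 j' hP')

theorem pvBest_inv {dicts : List (List (String × Bool))} {d1 : List (String × Bool)}
    {i : Nat} {u : PySem.Set Nat}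
    (hPre : ∀ d ∈ dicts, (d.map Prod.fst).Nodup) (hd1 : (d1.map Prod.fst).Nodup) :
    BInv dicts d1 i u (pvBest (pvBuild dicts) d1 i u) (List.range (pvSortedKeys d1).length) := by
  have := best_fold (i := i) (u := u) hPre hd1 (List.range (pvSortedKeys d1).length) none []
    (fun p hp => List.mem_range.mp hp) (Or.inl ⟨rfl, by simp⟩)
  simpa [pvBest] using this

-- a key of d1 is some sorted position, and conversely
theorem key_pos_iff {d1 : List (String × Bool)} {k : String} :
    k ∈ d1.map Prod.fst ↔
      ∃ p, p < (pvSortedKeys d1).length ∧ (pvSortedKeys d1).getD p "" = k := by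
  rw [← mem_ks]
  constructor
  · intro h
    obtain ⟨p, hp, hg⟩ := List.mem_iff_getElem.mp h
    exact ⟨p, hp, by rw [List.getD_eq_getElem _ _ hp]; exact hg⟩
  · rintro ⟨p, hp, hg⟩
    rw [← hg, List.getD_eq_getElem _ _ hp]
    exact List.getElem_mem _
-- ---- port A's inner scan ----
def predA (dicts : List (List (String × Bool))) (d1 : List (String × Bool))
    (u : PySem.Set Nat) (j : Nat) : Prop :=
  u.contains j = false ∧ pvKeysEqA d1 (dicts.getD j []) = true ∧
    (pvDif d1 (dicts.getD j [])).length = 1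

theorem scanA_none {dicts : List (List (String × Bool))} {d1 : List (String × Bool)}
    {u : PySem.Set Nat} : ∀ {l : List Nat},
    (pvScanA dicts d1 u l = none ↔ ∀ j ∈ l, ¬ predA dicts d1 u j) := by
  intro l
  induction l with
  | nil => simp [pvScanA]
  | cons j js ih =>
    rw [pvScanA]
    by_cases hu : u.contains j = true
    · rw [if_pos hu, ih]
      constructor
      · intro h j' hj'
        rcases List.mem_cons.mp hj' with rfl | hm
        · rintro ⟨h1, _⟩; rw [hu] at h1; cases h1
        · exact h j' hm
      · intro h j' hm; exact h j' (List.mem_cons_of_mem _ hm)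
    · have hu' : u.contains j = false := by revert hu; cases u.contains j <;> simp
      rw [if_neg hu]
      by_cases hK : pvKeysEqA d1 (dicts.getD j []) = true
      · rw [if_neg (by rw [hK]; simp)]
        by_cases hlen : (pvDif d1 (dicts.getD j [])).length = 1
        · rw [if_pos (by rw [Nat.beq_eq_true_eq]; exact hlen)]
          simp only [List.mem_cons]
          constructor
          · intro h; cases h
          · intro h
            exact absurd ⟨hu', hK, hlen⟩ (h j (Or.inl rfl))
        · rw [if_neg (by rw [Nat.beq_eq_true_eq]; exact hlen), ih]
          constructor
          · intro h j' hj'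
            rcases List.mem_cons.mp hj' with rfl | hm
            · rintro ⟨_, _, h3⟩; exact hlen h3
            · exact h j' hm
          · intro h j' hm; exact h j' (List.mem_cons_of_mem _ hm)
      · have hKf : pvKeysEqA d1 (dicts.getD j []) = false := by
          revert hK; cases pvKeysEqA d1 (dicts.getD j []) <;> simp
        rw [if_pos (by rw [hKf]; rfl), ih]
        constructor
        · intro h j' hj'
          rcases List.mem_cons.mp hj' with rfl | hm
          · rintro ⟨_, h2, _⟩; exact hK h2
          · exact h j' hm
        · intro h j' hm; exact h j' (List.mem_cons_of_mem _ hm)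

theorem scanA_some {dicts : List (List (String × Bool))} {d1 : List (String × Bool)}
    {u : PySem.Set Nat} : ∀ {l : List Nat} {j : Nat} {nd : List (String × Bool)},
    l.Pairwise (· < ·) → pvScanA dicts d1 u l = some (j, nd) →
    j ∈ l ∧ predA dicts d1 u j ∧
      nd = d1.filter (fun q => q.1 != (pvDif d1 (dicts.getD j [])).headD "") ∧
      ∀ j' ∈ l, predA dicts d1 u j' → j ≤ j' := by
  intro l
  induction l with
  | nil => intro j nd _ h; cases h
  | cons a js ih =>
    intro j nd hpw h
    rw [pvScanA] at h
    by_cases hu : u.contains a = true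
    · rw [if_pos hu] at h
      obtain ⟨hmem, hp, hnd, hmin⟩ := ih (List.pairwise_cons.mp hpw).2 h
      refine ⟨List.mem_cons_of_mem _ hmem, hp, hnd, ?_⟩
      intro j' hj' hp'
      rcases List.mem_cons.mp hj' with rfl | hm
      · exact absurd hp'.1 (by rw [hu]; simp)
      · exact hmin j' hm hp'
    · have hu' : u.contains a = false := by revert hu; cases u.contains a <;> simp
      rw [if_neg hu] at h
      by_cases hK : pvKeysEqA d1 (dicts.getD a []) = true
      · rw [if_neg (by rw [hK]; simp)] at h
        by_cases hlen : (pvDif d1 (dicts.getD a [])).length = 1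
        · rw [if_pos (by rw [Nat.beq_eq_true_eq]; exact hlen)] at h
          cases h
          refine ⟨List.mem_cons_self, ⟨hu', hK, hlen⟩, rfl, ?_⟩
          intro j' hj' _
          rcases List.mem_cons.mp hj' with rfl | hm
          · exact le_refl _
          · exact le_of_lt ((List.pairwise_cons.mp hpw).1 j' hm)
        · rw [if_neg (by rw [Nat.beq_eq_true_eq]; exact hlen)] at h
          obtain ⟨hmem, hp, hnd, hmin⟩ := ih (List.pairwise_cons.mp hpw).2 h
          refine ⟨List.mem_cons_of_mem _ hmem, hp, hnd, ?_⟩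
          intro j' hj' hp'
          rcases List.mem_cons.mp hj' with rfl | hm
          · exact absurd hp'.2.2 hlen
          · exact hmin j' hm hp'
      · have hKf : pvKeysEqA d1 (dicts.getD a []) = false := by
          revert hK; cases pvKeysEqA d1 (dicts.getD a []) <;> simp
        rw [if_pos (by rw [hKf]; rfl)] at h
        obtain ⟨hmem, hp, hnd, hmin⟩ := ih (List.pairwise_cons.mp hpw).2 h
        refine ⟨List.mem_cons_of_mem _ hmem, hp, hnd, ?_⟩
        intro j' hj' hp'
        rcases List.mem_cons.mp hj' with rfl | hm
        · exact absurd hp'.2.1 hK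
        · exact hmin j' hm hp'

-- ---- Bool transport for used-sets ----
theorem contains_add {s : PySem.Set Nat} {y x : Nat} :
    (PySem.Set.add s y).contains x = (s.contains x || x == y) := by
  rcases h : (s.contains x || x == y) with _ | _
  · simp only [Bool.or_eq_false_iff] at h
    rcases hb : (PySem.Set.add s y).contains x with _ | _
    · rfl
    · have hx := (PySem.Set.contains_iff _ _).mp hb
      rcases (PySem.Set.mem_add _ _ _).mp hx with hx | hx
      · rw [(PySem.Set.contains_iff _ _).mpr hx] at h; cases h.1
      · rw [hx] at h; simp at h
  · rcases Bool.or_eq_true_iff.mp h with h1 | h1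
    · exact (PySem.Set.contains_iff _ _).mpr
        ((PySem.Set.mem_add _ _ _).mpr (Or.inl ((PySem.Set.contains_iff _ _).mp h1)))
    · exact (PySem.Set.contains_iff _ _).mpr
        ((PySem.Set.mem_add _ _ _).mpr (Or.inr (by simpa using h1)))


-- ---- the two main loops agree ----
theorem loop_eq {dicts : List (List (String × Bool))}
    (hPre : ∀ d ∈ dicts, (d.map Prod.fst).Nodup) :
    ∀ (fuel m : Nat) (out : List (List (String × Bool))) (uA uB : PySem.Set Nat),
      dicts.length - m ≤ fuel →
      (∀ x, m ≤ x → uA.contains x = uB.contains x) →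
      pvLoopA dicts ((List.range dicts.length).drop m) (out, uA)
        = pvLoopB dicts (pvBuild dicts) ((List.range dicts.length).drop m) (out, uB) := by
  intro fuel
  induction fuel with
  | zero =>
    intro m out uA uB hf _
    rw [List.drop_eq_nil_of_le (by simp; omega)]
    rfl
  | succ fuel ih =>
    intro m out uA uB hf Hu
    by_cases hmn : m < dicts.length
    · rw [drop_range_cons hmn, pvLoopA, pvLoopB]
      have hcm := Hu m (le_refl m)
      rcases hc : uA.contains m with _ | _
      · have hcB : uB.contains m = false := by rw [← hcm]; exact hc
        rw [hcB]
        simp only [Bool.false_eq_true, if_false]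
        have hd1 : ((dicts.getD m []).map Prod.fst).Nodup := nodup_getD hPre hmn
        have hBInv := pvBest_inv (i := m) (u := uB) hPre hd1
        have equivP : ∀ j, (j ∈ (List.range dicts.length).drop (m+1) ∧
            predA dicts (dicts.getD m []) uA j) ↔
            ∃ p, p < (pvSortedKeys (dicts.getD m [])).length ∧
              pvP dicts (dicts.getD m []) m uB
                ((pvSortedKeys (dicts.getD m [])).getD p "") j := by
          intro j
          constructor
          · rintro ⟨hjm, hu, hK, hlen⟩
            obtain ⟨hmj, hjn⟩ := (mem_drop_range (dicts.length) dicts.length (m+1) j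
              (by omega)).mp hjm
            obtain ⟨k, hM⟩ := (matchB_iff hd1 (nodup_getD hPre hjn)).mp ⟨hK, hlen⟩
            obtain ⟨p, hp, hg⟩ := key_pos_iff.mp hM.1
            refine ⟨p, hp, by omega, hjn, ?_, hg ▸ hM⟩
            rw [← Hu j (by omega)]; exact hu
          · rintro ⟨p, hp, hmj, hjn, hu, hM⟩
            refine ⟨(mem_drop_range (dicts.length) dicts.length (m+1) j (by omega)).mpr
              ⟨by omega, hjn⟩, ?_, ?_⟩
            · rw [Hu j (by omega)]; exact hu
            · exact (matchB_iff hd1 (nodup_getD hPre hjn)).mpr ⟨_, hM⟩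
        rcases hA : pvScanA dicts (dicts.getD m []) uA ((List.range dicts.length).drop (m+1)) with
          _ | ⟨jA, nd⟩
        · -- A found no partner
          have hnoP : ∀ p, p < (pvSortedKeys (dicts.getD m [])).length →
              ∀ j, ¬ pvP dicts (dicts.getD m []) m uB
                ((pvSortedKeys (dicts.getD m [])).getD p "") j := by
            intro p hp j hP
            obtain ⟨hjm, hpred⟩ := (equivP j).mpr ⟨p, hp, hP⟩
            exact (scanA_none.mp hA) j hjm hpred
          have hBnone : pvBest (pvBuild dicts) (dicts.getD m []) m uB = none := by
            rcases hBInv with ⟨h0, _⟩ | ⟨j, p, h0, hpQ, hP, _⟩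
            · exact h0
            · exact absurd hP (hnoP p (List.mem_range.mp hpQ) j)
          simp only [hBnone]
          exact ih (m+1) (out ++ [dicts.getD m []]) uA uB (by omega)
            (fun x hx => Hu x (by omega))
        · -- A merged with jA
          obtain ⟨hjmem, hpredA, hnd, hminA⟩ := scanA_some pairwise_drop_range hA
          obtain ⟨p0, hp0, hPA⟩ := (equivP jA).mp ⟨hjmem, hpredA⟩
          have hBsome : ∃ jB pB,
              pvBest (pvBuild dicts) (dicts.getD m []) m uB
                = some (jB, (pvSortedKeys (dicts.getD m [])).getD pB "") ∧
              pB < (pvSortedKeys (dicts.getD m [])).length ∧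
              pvP dicts (dicts.getD m []) m uB
                ((pvSortedKeys (dicts.getD m [])).getD pB "") jB ∧
              ∀ p' ∈ List.range (pvSortedKeys (dicts.getD m [])).length, ∀ j',
                pvP dicts (dicts.getD m []) m uB
                  ((pvSortedKeys (dicts.getD m [])).getD p' "") j' → jB ≤ j' := by
            rcases hBInv with ⟨_, hnone⟩ | ⟨j, p, h0, hpQ, hP, hmin⟩
            · exact absurd hPA (hnone p0 (List.mem_range.mpr hp0) jA)
            · exact ⟨j, p, h0, List.mem_range.mp hpQ, hP, hmin⟩
          obtain ⟨jB, pB, hB, hpB, hPB, hminB⟩ := hBsome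
          have hje : jB = jA := by
            have h1 : jB ≤ jA := hminB p0 (List.mem_range.mpr hp0) jA hPA
            have h2 : jA ≤ jB := by
              apply hminA jB ((equivP jB).mpr ⟨pB, hpB, hPB⟩).1
                ((equivP jB).mpr ⟨pB, hpB, hPB⟩).2
            omega
          have hkey : (pvDif (dicts.getD m []) (dicts.getD jA [])).headD ""
              = (pvSortedKeys (dicts.getD m [])).getD pB "" := by
            have hndjA : ((dicts.getD jA []).map Prod.fst).Nodup :=
              nodup_getD hPre hPA.2.1
            obtain ⟨k0, hM0⟩ := (matchB_iff hd1 hndjA).mp ⟨hpredA.2.1, hpredA.2.2⟩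
            have hdif0 : pvDif (dicts.getD m []) (dicts.getD jA []) = [k0] :=
              ((matchAt_iff hd1 hndjA).mpr hM0).2
            have : k0 = (pvSortedKeys (dicts.getD m [])).getD pB "" :=
              matchAt_unique hndjA hM0 (hje ▸ hPB.2.2.2)
            rw [hdif0, this]; rfl
          simp only [hB, hje]
          rw [hnd, hkey]
          apply ih (m+1) _ _ _ (by omega)
          intro x hx
          rw [contains_add, contains_add, contains_add, Hu x (by omega)]
          have : (x == m) = false := by simp; omega
          rw [this]
          simp
      · have hcB : uB.contains m = true := by rw [← hcm]; exact hc
        rw [hcB]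
        simp only [if_true]
        exact ih (m+1) out uA uB (by omega) (fun x hx => Hu x (by omega))
    · rw [List.drop_eq_nil_of_le (by simp; omega)]
      rfl

-- ===== VERDICT (by name: the statement is the Claim_ definition above) =====
theorem consolidate_opposites_spec : Claim_equal_consolidate_opposites := by
  intro dicts _ hPre
  show consolidate_opposites dicts = consolidate_opposites_alt dicts
  rw [consolidate_opposites, consolidate_opposites_alt,
      show List.range dicts.length = (List.range dicts.length).drop 0 from rfl]
  exact loop_eq hPre dicts.length 0 [] PySem.Set.empty PySem.Set.empty (by omega)
    (fun x _ => rfl)
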